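-- pv_equiv track=rewrite | github.com/pypi-data/pypi-mirror-378 | packages/skycastle/skycastle-0.1.5-py3-none-any.whl/skycastle/game_commands/main_handler.py | _normalize_command_parts
-- ===== SOURCE A (Python) =====
-- from typing import List, Tuple, Optional, Dict
--
-- _COMMAND_ALIASES = {
--     # Navigation
--     'n': 'go north', 's': 'go south', 'e': 'go east', 'w': 'go west',
--     'u': 'go up', 'd': 'go down',
--     'north': 'go north', 'south': 'go south', 'east': 'go east',
--     'west': 'go west', 'up': 'go up', 'down': 'go down',
--     'move north': 'go north', 'walk north': 'go north', 'travel north': 'go north',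
--     # Interaction
--     'get': 'take', 'pick up': 'take', 'grab': 'take',
--     'put down': 'drop',
--     'examine': 'look', 'inspect': 'look',
--     'inv': 'inventory', 'i': 'inventory',
--     # Puzzles - These are typically direct verbs, no aliases needed for the verb itself,
--     # but the parser must recognize them as valid starting points for puzzle actions.
--     'read': 'read', 'activate': 'activate', 'use': 'use', # Explicitly list them for clarity
--     # System
--     'savegame': 'save', 'quitgame': 'quit', '?': 'help'
-- }
--
-- _IGNORABLE_WORDS = ['the', 'a', 'an', 'on', 'with', 'in', 'at', 'to', 'from']
--
-- def _normalize_command_parts(raw_input: str) -> List[str]: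
--     """
--     Normalizes the raw player input by applying aliases and splitting into parts.
--     Filters out ignorable words.
--     """
--     normalized_input = raw_input.lower().strip()
--
--     # Step 1: Check for exact alias matches (single word or multi-word)
--     if normalized_input in _COMMAND_ALIASES:
--         normalized_input = _COMMAND_ALIASES[normalized_input]
--     else:
--         # Step 2: Check for multi-word aliases at the beginning of the input
--         # This handles cases like "move north key" where "move north" is an alias for "go north"
--         longest_alias_match = None
--         for alias in sorted(_COMMAND_ALIASES.keys(), key=len, reverse=True): # Check longer aliases first
--             if normalized_input.startswith(f"{alias} "):
--                 longest_alias_match = alias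
--                 break
--
--         if longest_alias_match:
--             replacement = _COMMAND_ALIASES[longest_alias_match]
--             normalized_input = f"{replacement} {normalized_input[len(longest_alias_match)+1:]}"
--
--
--     # Step 3: Split into words and filter out ignorable words
--     # This list of `_IGNORABLE_WORDS` only explicitly contains single words. If a multi-word alias
--     # leads to a replacement that has 'on', 'the', etc., those will be handled in this step.
--     parts = [word for word in normalized_input.split() if word not in _IGNORABLE_WORDS]
--
--     # Special handling for single words that are alias parts but also potential commands
--     # e.g., 'read' is a valid command itself
--     if not parts and normalized_input not in _IGNORABLE_WORDS:
--         # If after filtering, parts become empty but raw_input was meaningful (not just ignorable words),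
--         # then the raw_input itself might be the command.
--         # This can happen if, for example, 'read' is an alias for 'read', and 'the' is an ignorable word.
--         # Input 'read the' -> normalized 'read '. Split and filter -> []. This is a tricky edge case.
--         # For now, we trust the `_COMMAND_ALIASES` to ensure commands are correctly formed.
--         pass # The parsing logic above should generally handle this for known commands
--
--     return parts
-- ===== SOURCE B (Python) =====
-- from typing import List
--
-- _COMMAND_ALIASES = {
--     'n': 'go north', 's': 'go south', 'e': 'go east', 'w': 'go west',
--     'u': 'go up', 'd': 'go down',
--     'north': 'go north', 'south': 'go south', 'east': 'go east',
--     'west': 'go west', 'up': 'go up', 'down': 'go down',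
--     'move north': 'go north', 'walk north': 'go north', 'travel north': 'go north',
--     'get': 'take', 'pick up': 'take', 'grab': 'take',
--     'put down': 'drop',
--     'examine': 'look', 'inspect': 'look',
--     'inv': 'inventory', 'i': 'inventory',
--     'read': 'read', 'activate': 'activate', 'use': 'use',
--     'savegame': 'save', 'quitgame': 'quit', '?': 'help'
-- }
--
-- _IGNORABLE_WORDS = ['the', 'a', 'an', 'on', 'with', 'in', 'at', 'to', 'from']
--
-- def _normalize_command_parts(raw_input: str) -> List[str]:
--     """Single max-tracking pass over the alias table: the longest alias that is
--     the whole input or a word-boundary prefix of it wins (an exact match is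
--     always strictly longer than any prefix match, so it wins automatically)."""
--     normalized_input = raw_input.lower().strip()
--
--     best = None  # (alias, replacement) with maximal len(alias)
--     for alias, replacement in _COMMAND_ALIASES.items():
--         if normalized_input == alias or normalized_input.startswith(alias + ' '):
--             if best is None or len(alias) > len(best[0]):
--                 best = (alias, replacement)
--
--     if best is not None:
--         alias, replacement = best
--         if alias == normalized_input:
--             normalized_input = replacement
--         else:
--             normalized_input = replacement + ' ' + normalized_input[len(alias) + 1:]
--
--     return [w for w in normalized_input.split() if w not in _IGNORABLE_WORDS]
-- ===== Notes on version B (the rewrite author's own statement) =====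
-- stated objective: simpler
-- what changed: Replaces A's two-phase lookup (exact dict membership test, then sorting all alias keys by length descending and breaking at the first word-boundary prefix match) with a single max-tracking pass over the alias items that keeps the longest alias equal to the input or a word-boundary prefix of it; no sort, no separate exact phase.
import Mathlib
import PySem

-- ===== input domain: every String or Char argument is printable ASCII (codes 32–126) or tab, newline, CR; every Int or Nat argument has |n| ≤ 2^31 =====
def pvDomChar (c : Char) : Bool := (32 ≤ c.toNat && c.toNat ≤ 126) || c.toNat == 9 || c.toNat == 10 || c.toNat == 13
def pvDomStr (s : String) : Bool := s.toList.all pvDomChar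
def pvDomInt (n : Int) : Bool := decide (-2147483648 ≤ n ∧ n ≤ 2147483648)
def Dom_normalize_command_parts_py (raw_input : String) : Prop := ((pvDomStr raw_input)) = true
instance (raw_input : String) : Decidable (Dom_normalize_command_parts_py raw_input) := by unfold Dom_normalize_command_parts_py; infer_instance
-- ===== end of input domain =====

-- B replaces A's sort-the-keys-then-first-prefix-match (plus a separate exact-match phase)
-- by one max-tracking pass over the alias table; objective: simpler (no sort, one uniform scan).

-- module-level constants shared by both Python versions
def pvAliases : List (List Char × List Char) :=
  [("n".toList, "go north".toList), ("s".toList, "go south".toList), ("e".toList, "go east".toList),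
   ("w".toList, "go west".toList), ("u".toList, "go up".toList), ("d".toList, "go down".toList),
   ("north".toList, "go north".toList), ("south".toList, "go south".toList), ("east".toList, "go east".toList),
   ("west".toList, "go west".toList), ("up".toList, "go up".toList), ("down".toList, "go down".toList),
   ("move north".toList, "go north".toList), ("walk north".toList, "go north".toList), ("travel north".toList, "go north".toList),
   ("get".toList, "take".toList), ("pick up".toList, "take".toList), ("grab".toList, "take".toList),
   ("put down".toList, "drop".toList),
   ("examine".toList, "look".toList), ("inspect".toList, "look".toList),
   ("inv".toList, "inventory".toList), ("i".toList, "inventory".toList),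
   ("read".toList, "read".toList), ("activate".toList, "activate".toList), ("use".toList, "use".toList),
   ("savegame".toList, "save".toList), ("quitgame".toList, "quit".toList), ("?".toList, "help".toList)]

def pvAliasDict : PySem.Dict (List Char) (List Char) := PySem.Dict.ofList pvAliases

def pvIgnorable : List (List Char) :=
  ["the".toList, "a".toList, "an".toList, "on".toList, "with".toList, "in".toList,
   "at".toList, "to".toList, "from".toList]

-- ===== PORT A =====
-- A's loop `for alias in sorted(keys, key=len, reverse=True): if startswith: break`
def pvFindPrefix (keys : List (List Char)) (n : List Char) : Option (List Char) :=
  match keys with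
  | [] => none
  | a :: rest => if PySem.Chars.startswith n (a ++ [' ']) then some a else pvFindPrefix rest n

def normalize_command_parts_py (raw_input : String) : List String :=
  let n := PySem.Chars.strip (PySem.Chars.lower raw_input.toList)
  let n2 :=
    if pvAliasDict.contains n then pvAliasDict.getD n []
    else
      match pvFindPrefix (PySem.List.sorted pvAliasDict.keys (fun k => PySem.Chars.len k) true) n with
      | some a => pvAliasDict.getD a [] ++ ' ' :: PySem.List.slice n (some ((a.length : Int) + 1)) none
      | none => n
  ((PySem.Chars.split₀ n2).filter (fun w => !pvIgnorable.contains w)).map (fun w => String.ofList w)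

-- ===== PORT B =====
-- B's loop body: keep the (alias, replacement) pair with maximal len(alias) among matches
def pvMatches (n a : List Char) : Bool := (n == a) || PySem.Chars.startswith n (a ++ [' '])

def pvBestStep (n : List Char) (best : Option (List Char × List Char)) (p : List Char × List Char) :
    Option (List Char × List Char) :=
  if pvMatches n p.1 then
    match best with
    | none => some p
    | some q => if q.1.length < p.1.length then some p else some q
  else best

def normalize_command_parts_py_alt (raw_input : String) : List String :=
  let n := PySem.Chars.strip (PySem.Chars.lower raw_input.toList)
  let n2 :=
    match pvAliases.foldl (pvBestStep n) none with
    | none => n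
    | some (a, r) => if a == n then r else r ++ ' ' :: PySem.List.slice n (some ((a.length : Int) + 1)) none
  ((PySem.Chars.split₀ n2).filter (fun w => !pvIgnorable.contains w)).map (fun w => String.ofList w)

-- ===== PRECONDITION & SPEC =====
def Spec_normalize_command_parts_py (raw_input : String) (out : List String) : Prop := out = normalize_command_parts_py_alt raw_input
instance (raw_input : String) (out : List String) : Decidable (Spec_normalize_command_parts_py raw_input out) := by unfold Spec_normalize_command_parts_py; infer_instance

-- ===== CLAIM (what is proved, stated in full; the proofs are below) =====
def Claim_equal_normalize_command_parts_py : Prop := ∀ (raw_input : String), Dom_normalize_command_parts_py raw_input → Spec_normalize_command_parts_py raw_input (normalize_command_parts_py raw_input)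

-- ===== LEMMAS AND PROOFS =====

theorem pvSw_length {n a : List Char} (h : PySem.Chars.startswith n (a ++ [' ']) = true) :
    a.length < n.length := by
  simp only [PySem.Chars.startswith, List.isPrefixOf_iff_prefix] at h
  have := h.length_le
  simp at this; omega

theorem pvSw_eq_of_length {n x y : List Char}
    (hx : PySem.Chars.startswith n (x ++ [' ']) = true)
    (hy : PySem.Chars.startswith n (y ++ [' ']) = true)
    (hlen : x.length = y.length) : x = y := by
  simp only [PySem.Chars.startswith, List.isPrefixOf_iff_prefix] at hx hy
  have hx' := List.prefix_iff_eq_take.mp hx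
  have hy' := List.prefix_iff_eq_take.mp hy
  have hl : (x ++ [' ']).length = (y ++ [' ']).length := by simp [hlen]
  have : x ++ [' '] = y ++ [' '] := by rw [hx', hy', hl]
  exact List.append_inj_left' this (by simp)

theorem pvMatches_eq_of_length {n x y : List Char}
    (hx : pvMatches n x = true) (hy : pvMatches n y = true)
    (hlen : x.length = y.length) : x = y := by
  simp only [pvMatches, Bool.or_eq_true, beq_iff_eq] at hx hy
  rcases hx with hx | hx <;> rcases hy with hy | hy
  · rw [← hx, ← hy]
  · exact absurd hlen (by have := pvSw_length hy; subst hx; omega)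
  · exact absurd hlen (by have := pvSw_length hx; subst hy; omega)
  · exact pvSw_eq_of_length hx hy hlen

theorem pvStep_stay (n : List Char) (q x : List Char × List Char)
    (h : pvMatches n x.1 = false ∨ ¬ q.1.length < x.1.length) :
    pvBestStep n (some q) x = some q := by
  rcases h with h | h <;> simp [pvBestStep, h]

theorem pvFold_stay (n : List Char) (q : List Char × List Char) :
    ∀ L : List (List Char × List Char),
      (∀ p ∈ L, pvMatches n p.1 = false ∨ ¬ q.1.length < p.1.length) →
      L.foldl (pvBestStep n) (some q) = some q := by
  intro L
  induction L with
  | nil => intro _; rfl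
  | cons x t ih =>
      intro h
      rw [List.foldl_cons, pvStep_stay n q x (h x (by simp))]
      exact ih (fun p hp => h p (by simp [hp]))

theorem pvFold_none (n : List Char) :
    ∀ L : List (List Char × List Char),
      (∀ p ∈ L, pvMatches n p.1 = false) →
      L.foldl (pvBestStep n) none = none := by
  intro L
  induction L with
  | nil => intro _; rfl
  | cons x t ih =>
      intro h
      have hx := h x (by simp)
      rw [List.foldl_cons, show pvBestStep n none x = none by simp [pvBestStep, hx]]
      exact ih (fun p hp => h p (by simp [hp]))

theorem pvFold_best (n : List Char) (p : List Char × List Char) :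
    ∀ (L : List (List Char × List Char)) (acc : Option (List Char × List Char)),
      p ∈ L → pvMatches n p.1 = true →
      (∀ q ∈ L, pvMatches n q.1 = true → q.1.length ≤ p.1.length) →
      (∀ q ∈ L, q.1 = p.1 → q = p) →
      (∀ q0, acc = some q0 → q0.1.length < p.1.length) →
      L.foldl (pvBestStep n) acc = some p := by
  intro L
  induction L with
  | nil => intro acc h; cases h
  | cons x t ih =>
      intro acc hmem hm hdom hkey hacc
      by_cases hxp : x = p
      · subst hxp
        have hstep : pvBestStep n acc x = some x := by
          cases acc with
          | none => simp [pvBestStep, hm]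
          | some q0 =>
              have := hacc q0 rfl
              simp [pvBestStep, hm, this]
        rw [List.foldl_cons, hstep]
        refine pvFold_stay n x t (fun r hr => ?_)
        by_cases hmr : pvMatches n r.1 = true
        · exact Or.inr (by have := hdom r (by simp [hr]) hmr; omega)
        · exact Or.inl (by simpa using hmr)
      · have hpt : p ∈ t := (List.mem_cons.mp hmem).resolve_left (fun h => absurd h.symm hxp)
        have hdom' : ∀ q ∈ t, pvMatches n q.1 = true → q.1.length ≤ p.1.length :=
          fun q hq => hdom q (by simp [hq])
        have hkey' : ∀ q ∈ t, q.1 = p.1 → q = p := fun q hq => hkey q (by simp [hq])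
        by_cases hx : pvMatches n x.1 = true
        · have hxlt : x.1.length < p.1.length := by
            have hle := hdom x (by simp) hx
            rcases lt_or_eq_of_le hle with h | h
            · exact h
            · exact absurd (hkey x (by simp) (pvMatches_eq_of_length hx hm h)) hxp
          have hstep : pvBestStep n acc x = some x ∨ pvBestStep n acc x = acc := by
            cases acc with
            | none => left; simp [pvBestStep, hx]
            | some q0 =>
                by_cases hq : q0.1.length < x.1.length
                · left; simp [pvBestStep, hx, hq]
                · right; simp [pvBestStep, hx, hq]
          rw [List.foldl_cons]
          rcases hstep with hstep | hstep <;> rw [hstep]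
          · exact ih (some x) hpt hm hdom' hkey' (by rintro q0 ⟨rfl⟩; exact hxlt)
          · exact ih acc hpt hm hdom' hkey' hacc
        · rw [List.foldl_cons, show pvBestStep n acc x = acc by simp [pvBestStep, Bool.eq_false_iff.mpr hx]]
          exact ih acc hpt hm hdom' hkey' hacc

theorem pvFindPrefix_some {n a : List Char} :
    ∀ S : List (List Char), pvFindPrefix S n = some a →
      a ∈ S ∧ PySem.Chars.startswith n (a ++ [' ']) = true := by
  intro S
  induction S with
  | nil => intro h; cases h
  | cons x t ih =>
      intro h
      by_cases hx : PySem.Chars.startswith n (x ++ [' ']) = true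
      · simp only [pvFindPrefix, hx, if_true, Option.some.injEq] at h
        subst h; exact ⟨by simp, hx⟩
      · simp only [pvFindPrefix, hx] at h
        obtain ⟨h1, h2⟩ := ih h
        exact ⟨by simp [h1], h2⟩

theorem pvFindPrefix_max {n a : List Char} :
    ∀ S : List (List Char), S.Pairwise (fun x y => y.length ≤ x.length) →
      pvFindPrefix S n = some a →
      ∀ b ∈ S, PySem.Chars.startswith n (b ++ [' ']) = true → b.length ≤ a.length := by
  intro S
  induction S with
  | nil => intro _ h; cases h
  | cons x t ih =>
      intro hpw h b hb hswb
      have hpw' := List.pairwise_cons.mp hpw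
      by_cases hx : PySem.Chars.startswith n (x ++ [' ']) = true
      · simp only [pvFindPrefix, hx, if_true, Option.some.injEq] at h
        subst h
        rcases List.mem_cons.mp hb with rfl | hb
        · exact le_refl _
        · exact hpw'.1 b hb
      · simp only [pvFindPrefix, hx] at h
        rcases List.mem_cons.mp hb with rfl | hb
        · exact absurd hswb hx
        · exact ih hpw'.2 h b hb hswb

theorem pvFindPrefix_none {n : List Char} :
    ∀ S : List (List Char), pvFindPrefix S n = none →
      ∀ b ∈ S, PySem.Chars.startswith n (b ++ [' ']) = false := by
  intro S
  induction S with
  | nil => intro _ b hb; cases hb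
  | cons x t ih =>
      intro h b hb
      by_cases hx : PySem.Chars.startswith n (x ++ [' ']) = true
      · simp [pvFindPrefix, hx] at h
      · simp only [pvFindPrefix, hx] at h
        rcases List.mem_cons.mp hb with rfl | hb
        · exact Bool.eq_false_iff.mpr hx
        · exact ih h b hb

theorem pvItems_eq : pvAliasDict.items = pvAliases := by decide

theorem pvKeysNodup : pvAliasDict.keys.Nodup := by decide

theorem pvKeys_eq : pvAliasDict.keys = pvAliases.map Prod.fst := by decide

theorem pvKeyInj : ∀ q ∈ pvAliases, ∀ p ∈ pvAliases, q.1 = p.1 → q = p := by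
  have h : (pvAliases.map Prod.fst).Nodup := by rw [← pvKeys_eq]; exact pvKeysNodup
  intro q hq p hp hqp
  exact List.inj_on_of_nodup_map h hq hp hqp

-- the core: A's two-phase choice of n2 equals B's single max-tracking fold
theorem pvNorm_eq (n : List Char) :
    (if pvAliasDict.contains n then pvAliasDict.getD n []
     else
       match pvFindPrefix (PySem.List.sorted pvAliasDict.keys (fun k => PySem.Chars.len k) true) n with
       | some a => pvAliasDict.getD a [] ++ ' ' :: PySem.List.slice n (some ((a.length : Int) + 1)) none
       | none => n) =
    (match pvAliases.foldl (pvBestStep n) none with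
     | none => n
     | some (a, r) => if a == n then r else r ++ ' ' :: PySem.List.slice n (some ((a.length : Int) + 1)) none) := by
  by_cases hc : pvAliasDict.contains n = true
  · -- exact-match case
    have hmemk : n ∈ pvAliases.map Prod.fst := by
      have := hc
      rw [PySem.Dict.contains_eq_decide_mem_keys, pvKeys_eq] at this
      exact of_decide_eq_true this
    obtain ⟨⟨pa, pr⟩, hp, hp1⟩ := List.mem_map.mp hmemk
    have hpa : pa = n := hp1
    have hget : pvAliasDict.getD n [] = pr := by
      have hmem : (n, pr) ∈ pvAliasDict.items := by
        rw [pvItems_eq]; rw [← hpa]; exact hp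
      exact PySem.Dict.getD_of_mem_items pvAliasDict hmem pvKeysNodup []
    have hfold : pvAliases.foldl (pvBestStep n) none = some (pa, pr) := by
      refine pvFold_best n (pa, pr) pvAliases none hp (by simp [pvMatches, hpa]) ?_
        (fun q hq => pvKeyInj q hq (pa, pr) hp) (by simp)
      intro q hq hmq
      simp only [pvMatches, Bool.or_eq_true, beq_iff_eq] at hmq
      rcases hmq with h | h
      · rw [← h]; simp [hpa]
      · have hl := pvSw_length h
        have hp1l : pa.length = n.length := by rw [hpa]
        show q.1.length ≤ pa.length
        omega
    rw [if_pos hc, hfold, hget]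
    show pr = if (pa == n) = true then pr
      else pr ++ ' ' :: PySem.List.slice n (some ((pa.length : Int) + 1)) none
    rw [show (pa == n) = true from by simp [hpa]]
    simp
  · -- no exact match
    have hnotmem : n ∉ pvAliases.map Prod.fst := by
      intro hmem
      apply hc
      rw [PySem.Dict.contains_eq_decide_mem_keys, pvKeys_eq]
      exact decide_eq_true hmem
    have hne : ∀ q ∈ pvAliases, (n == q.1) = false := by
      intro q hq
      by_contra h
      have : n = q.1 := by simpa using Bool.not_eq_false _ |>.mp h
      exact hnotmem (this ▸ List.mem_map_of_mem hq)
    rw [if_neg hc]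
    cases hf : pvFindPrefix (PySem.List.sorted pvAliasDict.keys (fun k => PySem.Chars.len k) true) n with
    | none =>
        have hnom : ∀ p ∈ pvAliases, pvMatches n p.1 = false := by
          intro p hp
          have hsw := pvFindPrefix_none _ hf p.1
            (by rw [PySem.List.mem_sorted, pvKeys_eq]; exact List.mem_map_of_mem hp)
          simp [pvMatches, hne p hp, hsw]
        rw [pvFold_none n pvAliases hnom]
    | some a =>
        obtain ⟨haS, hswa⟩ := pvFindPrefix_some _ hf
        have haK : a ∈ pvAliases.map Prod.fst := by
          rw [← pvKeys_eq, ← PySem.List.mem_sorted pvAliasDict.keys (fun k => PySem.Chars.len k) true]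
          exact haS
        obtain ⟨⟨pa, pr⟩, hp, hp1⟩ := List.mem_map.mp haK
        have hpa : pa = a := hp1
        subst hpa
        have hget : pvAliasDict.getD pa [] = pr := by
          have hmem : (pa, pr) ∈ pvAliasDict.items := by rw [pvItems_eq]; exact hp
          exact PySem.Dict.getD_of_mem_items pvAliasDict hmem pvKeysNodup []
        have hpw : (PySem.List.sorted pvAliasDict.keys (fun k => PySem.Chars.len k) true).Pairwise
            (fun x y => y.length ≤ x.length) := by
          have := PySem.List.sorted_pairwise_rev pvAliasDict.keys (fun k => PySem.Chars.len k)
          simpa [PySem.Chars.len_eq] using this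
        have hfold : pvAliases.foldl (pvBestStep n) none = some (pa, pr) := by
          refine pvFold_best n (pa, pr) pvAliases none hp (by simp [pvMatches, hswa]) ?_
            (fun q hq => pvKeyInj q hq (pa, pr) hp) (by simp)
          intro q hq hmq
          simp only [pvMatches, hne q hq, Bool.false_or] at hmq
          have hqS : q.1 ∈ PySem.List.sorted pvAliasDict.keys (fun k => PySem.Chars.len k) true := by
            rw [PySem.List.mem_sorted, pvKeys_eq]; exact List.mem_map_of_mem hq
          exact pvFindPrefix_max _ hpw hf q.1 hqS hmq
        have hbne : (pa == n) = false := by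
          have := pvSw_length hswa
          by_contra h
          have : pa = n := by simpa using Bool.not_eq_false _ |>.mp h
          subst this
          omega
        rw [hfold]
        show pvAliasDict.getD pa [] ++ ' ' :: PySem.List.slice n (some ((pa.length : Int) + 1)) none =
          if (pa == n) = true then pr
          else pr ++ ' ' :: PySem.List.slice n (some ((pa.length : Int) + 1)) none
        rw [hget, hbne]
        simp

-- ===== VERDICT (by name: the statement is the Claim_ definition above) =====
theorem normalize_command_parts_py_spec : Claim_equal_normalize_command_parts_py := by
  intro raw_input _
  unfold Spec_normalize_command_parts_py normalize_command_parts_py normalize_command_parts_py_alt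
  dsimp only []
  rw [pvNorm_eq]
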